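-- pv_equiv track=rewrite | github.com/we1pingyu/rag | dyn_offline.py | _get_config_for_batch
-- ===== SOURCE A (Python) =====
-- from typing import List, Dict, Optional
--
-- def _get_config_for_batch(batch_index: int, total_batches: int, configs: List[Dict]) -> Dict:
--     """Determine which configuration to use for a given batch"""
--     if not configs:
--         return {}
--
--     # Calculate absolute boundaries for each config
--     boundaries = []
--     current_boundary = 0
--     remaining_batches = total_batches
--
--     for i, config in enumerate(configs[:-1]):
--         config_batches = config.get("num_batches", remaining_batches // (len(configs) - i))
--         current_boundary += config_batches
--         boundaries.append(current_boundary)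
--         remaining_batches -= config_batches
--
--     # Find appropriate config based on batch index
--     for i, boundary in enumerate(boundaries):
--         if batch_index < boundary:
--             return configs[i]
--
--     return configs[-1]  # Use last config for remaining batches
-- ===== SOURCE B (Python) =====
-- def _get_config_for_batch(batch_index: int, total_batches: int, configs):
--     """Single fused pass: keep the running boundary and return as soon as it
--     passes batch_index; no intermediate boundaries list."""
--     if not configs:
--         return {}
--     current_boundary = 0
--     remaining = total_batches
--     k = len(configs)
--     for config in configs[:-1]:
--         config_batches = config.get("num_batches", remaining // k)
--         current_boundary += config_batches
--         if batch_index < current_boundary: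
--             return config
--         remaining -= config_batches
--         k -= 1
--     return configs[-1]
-- ===== Notes on version B (the rewrite author's own statement) =====
-- stated objective: simpler
-- what changed: Fuses A's two passes (build a boundaries list, then scan it) into one loop over configs[:-1] that keeps only the running boundary and returns the config itself at the first hit, eliminating the intermediate list and the index-based second scan.
import Mathlib
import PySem

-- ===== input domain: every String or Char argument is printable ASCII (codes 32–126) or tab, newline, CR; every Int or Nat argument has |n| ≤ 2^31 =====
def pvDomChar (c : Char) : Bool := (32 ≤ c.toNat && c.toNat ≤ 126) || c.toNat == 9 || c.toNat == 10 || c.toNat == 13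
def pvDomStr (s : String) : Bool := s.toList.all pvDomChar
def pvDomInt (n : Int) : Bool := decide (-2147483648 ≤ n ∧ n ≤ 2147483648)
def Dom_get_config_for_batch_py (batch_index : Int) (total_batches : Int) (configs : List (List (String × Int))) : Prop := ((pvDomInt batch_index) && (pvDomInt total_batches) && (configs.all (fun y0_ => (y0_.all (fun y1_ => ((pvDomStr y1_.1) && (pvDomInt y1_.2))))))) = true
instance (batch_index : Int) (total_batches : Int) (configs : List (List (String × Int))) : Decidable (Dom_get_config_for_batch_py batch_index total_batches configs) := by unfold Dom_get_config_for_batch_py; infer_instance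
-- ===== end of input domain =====

-- B fuses A's two passes (build a boundaries list, then scan it) into one loop
-- that keeps only the running boundary and returns at the first hit (objective: simpler).

-- dict.get(k, dflt) on an association list: first match, else the default
def pvDictGetD (c : List (String × Int)) (k : String) (d : Int) : Int :=
  (c.lookup k).getD d

-- ===== PORT A =====
-- first loop of A: build the boundaries list (i is the enumerate index, n = len(configs))
def pvA_build (cb rem : Int) (i : Nat) (n : Int) (rest : List (List (String × Int))) : List Int :=
  match rest with
  | [] => []
  | c :: cs =>
      let g := pvDictGetD c "num_batches" (PySem.Int.floordiv rem (n - (i : Int)))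
      (cb + g) :: pvA_build (cb + g) (rem - g) (i + 1) n cs

-- second loop of A: first boundary exceeding batch_index picks configs[i]; else configs[-1]
-- (configs[i] with i < len(configs) - 1 always in range, so the .getD [] default is never used)
def pvA_find (bi : Int) (bs : List Int) (configs : List (List (String × Int))) (i : Nat) : List (String × Int) :=
  match bs with
  | [] => (PySem.List.pyGet? configs (-1)).getD []
  | b :: rest =>
      if bi < b then (PySem.List.pyGet? configs ((i : Int))).getD []
      else pvA_find bi rest configs (i + 1)

def get_config_for_batch_py (batch_index : Int) (total_batches : Int) (configs : List (List (String × Int))) : List (String × Int) :=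
  if configs = [] then []
  else pvA_find batch_index
        (pvA_build 0 total_batches 0 (configs.length : Int) (PySem.List.slice configs none (some (-1))))
        configs 0

-- ===== PORT B =====
-- B's single loop over configs[:-1]: running boundary cb, remaining batches rem, countdown k
def pvB_loop (bi cb rem k : Int) (rest : List (List (String × Int))) (last : List (String × Int)) : List (String × Int) :=
  match rest with
  | [] => last
  | c :: cs =>
      let g := pvDictGetD c "num_batches" (PySem.Int.floordiv rem k)
      if bi < cb + g then c
      else pvB_loop bi (cb + g) (rem - g) (k - 1) cs last

def get_config_for_batch_py_alt (batch_index : Int) (total_batches : Int) (configs : List (List (String × Int))) : List (String × Int) :=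
  if configs = [] then []
  else pvB_loop batch_index 0 total_batches (configs.length : Int)
        (PySem.List.slice configs none (some (-1)))
        ((PySem.List.pyGet? configs (-1)).getD [])

-- ===== PRECONDITION & SPEC =====
def Spec_get_config_for_batch_py (batch_index : Int) (total_batches : Int) (configs : List (List (String × Int))) (out : List (String × Int)) : Prop := out = get_config_for_batch_py_alt batch_index total_batches configs
instance (batch_index : Int) (total_batches : Int) (configs : List (List (String × Int))) (out : List (String × Int)) : Decidable (Spec_get_config_for_batch_py batch_index total_batches configs out) := by unfold Spec_get_config_for_batch_py; infer_instance

-- ===== CLAIM (what is proved, stated in full; the proofs are below) =====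
def Claim_equal_get_config_for_batch_py : Prop := ∀ (batch_index : Int) (total_batches : Int) (configs : List (List (String × Int))), Dom_get_config_for_batch_py batch_index total_batches configs → Spec_get_config_for_batch_py batch_index total_batches configs (get_config_for_batch_py batch_index total_batches configs)

-- ===== LEMMAS AND PROOFS =====

-- A's scan of the pre-built boundaries list equals B's fused loop, provided the
-- index i addresses `rest` inside `configs` and k = n - i.
theorem pvFind_build (bi : Int) (configs : List (List (String × Int))) :
    ∀ (rest : List (List (String × Int))) (i : Nat) (cb rem k n : Int),
      k = n - (i : Int) →
      (∀ (j : Nat) (h : j < rest.length),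
          PySem.List.pyGet? configs (((i + j : Nat) : Int)) = some rest[j]) →
      pvA_find bi (pvA_build cb rem i n rest) configs i
        = pvB_loop bi cb rem k rest ((PySem.List.pyGet? configs (-1)).getD []) := by
  intro rest
  induction rest with
  | nil => intro i cb rem k n hk H; simp [pvA_build, pvA_find, pvB_loop]
  | cons c cs ih =>
      intro i cb rem k n hk H
      have hc : PySem.List.pyGet? configs ((i : Int)) = some c := by
        have := H 0 (by simp)
        simpa using this
      simp only [pvA_build, pvA_find, pvB_loop]
      rw [hk]
      by_cases hlt : bi < cb + pvDictGetD c "num_batches" (PySem.Int.floordiv rem (n - (i : Int)))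
      · simp [hlt, hc]
      · simp only [hlt, if_false]
        have hk' : n - (i : Int) - 1 = n - ((i + 1 : Nat) : Int) := by push_cast; ring
        rw [hk']
        exact ih (i + 1) _ _ _ n rfl (by
          intro j hj
          have := H (j + 1) (by simpa using Nat.succ_lt_succ hj)
          have harg : (i + (j + 1) : Nat) = (i + 1 + j : Nat) := by omega
          rw [harg] at this
          simpa using this)

-- ===== VERDICT (by name: the statement is the Claim_ definition above) =====
theorem get_config_for_batch_py_spec : Claim_equal_get_config_for_batch_py := by
  intro bi tb configs _
  unfold Spec_get_config_for_batch_py get_config_for_batch_py get_config_for_batch_py_alt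
  by_cases h : configs = []
  · simp [h]
  · simp only [h, if_false]
    apply pvFind_build
    · simp
    · intro j hj
      have hlen : (PySem.List.slice configs none (some (-1))) = configs.dropLast := by
        rw [PySem.List.slice_to_neg_one]
      simp only [hlen] at hj ⊢
      have hj' : j < configs.length := by
        have := List.length_dropLast (xs := configs); omega
      simp [PySem.List.pyGet?_natCast, List.getElem?_eq_getElem hj',
        List.getElem_dropLast]
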